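-- pv_equiv track=rewrite | github.com/javs9805/artificial-intelligence | Tarea 1/IA_N_Puzzle_2.py | GENERAR_MATRIZ_META
-- ===== SOURCE A (Python) =====
-- def GENERAR_MATRIZ_META(N):
--     if N < 2:
--         raise ValueError("N debe ser igual o mayor que 2")
--
--     matriz = [[0] * N for _ in range(N)]
--     num = 1
--
--     for i in range(N):
--         for j in range(N):
--             if num == N * N:
--                 matriz[N-1][N-1] = 0
--                 return matriz
--             matriz[i][j] = num
--             num += 1
--
--     return matriz
-- ===== SOURCE B (Python) =====
-- def GENERAR_MATRIZ_META(N):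
--     if N < 2:
--         raise ValueError("N debe ser igual o mayor que 2")
--
--     flat = list(range(1, N * N)) + [0]
--     return [flat[i * N:(i + 1) * N] for i in range(N)]
-- ===== Notes on version B (the rewrite author's own statement) =====
-- stated objective: simpler
-- what changed: Replaces the nested double loop with a running counter and an early-return sentinel by a single flat list 1..N*N-1 plus trailing 0, reshaped into rows by slicing.
import Mathlib
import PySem

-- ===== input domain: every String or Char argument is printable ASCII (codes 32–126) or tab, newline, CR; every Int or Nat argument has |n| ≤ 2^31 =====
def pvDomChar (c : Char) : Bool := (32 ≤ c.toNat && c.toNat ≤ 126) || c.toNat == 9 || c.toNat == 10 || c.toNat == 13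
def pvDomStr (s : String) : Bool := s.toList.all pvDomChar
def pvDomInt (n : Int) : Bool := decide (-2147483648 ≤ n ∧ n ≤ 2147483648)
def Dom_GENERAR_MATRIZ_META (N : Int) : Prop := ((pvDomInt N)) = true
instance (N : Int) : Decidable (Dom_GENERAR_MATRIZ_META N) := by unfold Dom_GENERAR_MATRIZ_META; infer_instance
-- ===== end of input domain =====

-- B replaces A's nested loops / running counter / early-return sentinel by one flat list 1..N*N-1 ++ [0]
-- reshaped into rows by slicing (objective: simpler). A raises ValueError for N < 2; Pre_ excludes those inputs.

-- ===== PORT A =====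
-- matriz[i][j] = v  (exact for the nonnegative in-range indices A uses)
def pvSet2 (m : List (List Int)) (i j v : Int) : List (List Int) :=
  m.set i.toNat ((m.getD i.toNat []).set j.toNat v)

-- the inner 'for j in range(N)' loop; Sum.inl = the early 'return matriz'
def pvLoopJ (N i : Int) : List Int → List (List Int) × Int → (List (List Int)) ⊕ (List (List Int) × Int)
  | [], st => Sum.inr st
  | j :: js, (m, num) =>
    if num = N * N then Sum.inl (pvSet2 m (N-1) (N-1) 0)
    else pvLoopJ N i js (pvSet2 m i j num, num + 1)

-- the outer 'for i in range(N)' loop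
def pvLoopI (N : Int) : List Int → List (List Int) × Int → List (List Int)
  | [], (m, _) => m
  | i :: is, st =>
    match pvLoopJ N i (PySem.List.pyRange 0 N 1) st with
    | Sum.inl m' => m'
    | Sum.inr st' => pvLoopI N is st'

def GENERAR_MATRIZ_META (N : Int) : List (List Int) :=
  if N < 2 then []  -- Python raises ValueError here; excluded by Pre_
  else pvLoopI N (PySem.List.pyRange 0 N 1)
        ((PySem.List.pyRange 0 N 1).map (fun _ => List.replicate N.toNat 0), 1)

-- ===== PORT B =====
def GENERAR_MATRIZ_META_alt (N : Int) : List (List Int) :=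
  if N < 2 then []  -- Python raises ValueError here; excluded by Pre_
  else
    let flat := PySem.List.pyRange 1 (N * N) 1 ++ [0]
    (PySem.List.pyRange 0 N 1).map (fun i => PySem.List.slice flat (some (i * N)) (some ((i + 1) * N)))

-- ===== PRECONDITION & SPEC =====
-- A raises ValueError exactly when N < 2; Pre_ admits all other inputs.
def Pre_GENERAR_MATRIZ_META (N : Int) : Prop := 2 ≤ N
instance (N : Int) : Decidable (Pre_GENERAR_MATRIZ_META N) := by unfold Pre_GENERAR_MATRIZ_META; infer_instance
def pvWitness_GENERAR_MATRIZ_META : Int := 3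

def Spec_GENERAR_MATRIZ_META (N : Int) (out : List (List Int)) : Prop := out = GENERAR_MATRIZ_META_alt N
instance (N : Int) (out : List (List Int)) : Decidable (Spec_GENERAR_MATRIZ_META N out) := by unfold Spec_GENERAR_MATRIZ_META; infer_instance

-- ===== CLAIM (what is proved, stated in full; the proofs are below) =====
def Claim_equal_GENERAR_MATRIZ_META : Prop := ∀ (N : Int), Dom_GENERAR_MATRIZ_META N → Pre_GENERAR_MATRIZ_META N → Spec_GENERAR_MATRIZ_META N (GENERAR_MATRIZ_META N)

-- ===== LEMMAS AND PROOFS =====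

-- the intended goal matrix, row by row
def rowFull (n i : Nat) : List Int := (List.range n).map (fun j => ((i * n + j : Nat) : Int) + 1)
def lastRow (n : Nat) : List Int :=
  (List.range (n-1)).map (fun j => (((n-1) * n + j : Nat) : Int) + 1) ++ [0]
def specRow (n i : Nat) : List Int := if i + 1 = n then lastRow n else rowFull n i

lemma pvCastNe (x t n : Nat) (h : x + t < n * n) :
    ((x : Nat) : Int) + (t : Int) ≠ (n : Int) * n := by
  rw [show ((n : Int) * n) = ((n * n : Nat) : Int) by push_cast; ring]
  intro hc
  have : x + t = n * n := by exact_mod_cast hc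
  omega

lemma set2_mid (pre rest : List (List Int)) (row : List Int) (ii a : Nat) (v : Int)
    (h : pre.length = ii) :
    pvSet2 (pre ++ row :: rest) (ii : Int) (a : Int) v = pre ++ row.set a v :: rest := by
  subst h
  simp [pvSet2, List.getD]

lemma pvLoopJ_append (N i : Int) (js1 js2 : List Int) (st st' : List (List Int) × Int)
    (h : pvLoopJ N i js1 st = Sum.inr st') :
    pvLoopJ N i (js1 ++ js2) st = pvLoopJ N i js2 st' := by
  induction js1 generalizing st with
  | nil =>
    rw [List.nil_append]
    simp only [pvLoopJ] at h
    injection h with h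
    rw [h]
  | cons j js ih =>
    obtain ⟨m, num⟩ := st
    by_cases hnum : num = N * N
    · simp [pvLoopJ, hnum] at h
    · simp only [pvLoopJ, List.cons_append, if_neg hnum] at h ⊢
      exact ih _ h

lemma pvLoopJ_trigger (N i j : Int) (js : List Int) (m : List (List Int)) :
    pvLoopJ N i (j :: js) (m, N * N) = Sum.inl (pvSet2 m (N-1) (N-1) 0) := by
  simp [pvLoopJ]

lemma innerFill (n ii : Nat) :
    ∀ (k a : Nat) (row : List Int) (pre rest : List (List Int)) (num : Int),
    pre.length = ii → row.length = n → a + k ≤ n →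
    (∀ t : Nat, t < k → num + (t : Int) ≠ (n : Int) * n) →
    pvLoopJ (n : Int) (ii : Int) ((List.range' a k).map (fun x : Nat => (x : Int))) (pre ++ row :: rest, num)
      = Sum.inr (pre ++ (row.take a ++ (List.range k).map (fun t : Nat => num + (t : Int)) ++ row.drop (a + k)) :: rest, num + (k : Int)) := by
  intro k
  induction k with
  | zero =>
    intro a row pre rest num hpre hrow hak _
    simp [pvLoopJ, List.take_append_drop]
  | succ k ih =>
    intro a row pre rest num hpre hrow hak hne
    have hne0 : num ≠ (n : Int) * n := by
      have := hne 0 (Nat.succ_pos k); simpa using this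
    have ha : a < row.length := by omega
    rw [List.range'_succ]
    simp only [List.map_cons, pvLoopJ, if_neg hne0]
    rw [set2_mid pre rest row ii a num hpre]
    have hrec := ih (a+1) (row.set a num) pre rest (num + 1) hpre (by simp [hrow]) (by omega)
      (fun t ht => by
        have := hne (t+1) (by omega)
        push_cast at this ⊢
        intro hc; apply this; linarith)
    rw [hrec]
    congr 2
    · -- the assembled row
      rw [List.set_eq_take_append_cons_drop, if_pos ha]
      have hlt : (List.take a row).length = a := by simp; omega
      rw [List.range_succ_eq_map]
      simp only [List.map_cons, List.map_map]
      rw [List.take_append, List.drop_append, hlt]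
      rw [List.take_take, show min (a+1) a = a by omega]
      rw [show a + 1 - a = 0 + 1 by omega, List.take_succ_cons, List.take_zero]
      rw [show a + 1 + k - a = k + 1 by omega]
      rw [List.drop_eq_nil_of_le (by rw [hlt]; omega), List.nil_append]
      rw [List.drop_succ_cons, List.drop_drop]
      rw [show List.map ((fun t : Nat => num + (t : Int)) ∘ Nat.succ) (List.range k)
            = List.map (fun t : Nat => num + 1 + (t : Int)) (List.range k) from
          List.map_congr_left (fun t _ => by simp only [Function.comp_apply]; push_cast; ring)]
      rw [show a + 1 + k = a + (k + 1) by omega]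
      simp [List.append_assoc]
    · push_cast; ring

lemma lastRowLem (n : Nat) (hn : 2 ≤ n) (pre : List (List Int)) (hpre : pre.length = n - 1) :
    pvLoopJ (n : Int) ((n - 1 : Nat) : Int) ((List.range' 0 n).map (fun x : Nat => (x : Int)))
        (pre ++ [List.replicate n 0], (((n-1) * n + 1 : Nat) : Int))
      = Sum.inl (pre ++ [lastRow n]) := by
  have hMn : (n-1) * n = n * n - n := by rw [Nat.sub_one_mul]
  have hnM : n ≤ n * n := Nat.le_mul_of_pos_left n (by omega)
  have hsplit : List.range' 0 n = List.range' 0 (n-1) ++ [n-1] := by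
    conv_lhs => rw [show n = (n-1)+1 by omega]
    rw [List.range'_concat]
    simp
  rw [hsplit, List.map_append]
  have hfill := innerFill n (n-1) (n-1) 0 (List.replicate n (0:Int)) pre []
      (((n-1) * n + 1 : Nat) : Int) hpre (by simp) (by omega)
      (fun t ht => pvCastNe ((n-1) * n + 1) t n (by omega))
  rw [pvLoopJ_append _ _ _ _ _ _ hfill]
  have hnum : (((n-1) * n + 1 : Nat) : Int) + ((n - 1 : Nat) : Int) = (n : Int) * n := by
    rw [show ((n : Int) * n) = ((n * n : Nat) : Int) by push_cast; ring]
    exact_mod_cast (show (n-1) * n + 1 + (n - 1) = n * n by omega)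
  have hdrop : (List.replicate n (0:Int)).drop (0 + (n-1)) = [0] := by
    have : n - (n-1) = 1 := by omega
    simp [List.drop_replicate, this]
  rw [List.map_cons, List.map_nil, List.take_zero, List.nil_append, hdrop, hnum, pvLoopJ_trigger]
  have hcast : ((n : Int) - 1) = ((n - 1 : Nat) : Int) := by omega
  rw [hcast]
  rw [set2_mid pre [] _ (n-1) (n-1) 0 hpre]
  congr 2
  rw [List.set_append]
  have hmaplen : ((List.range (n-1)).map (fun t : Nat => (((n-1) * n + 1 : Nat) : Int) + (t : Int))).length = n - 1 := by simp
  rw [if_neg (by omega), hmaplen, Nat.sub_self]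
  simp only [List.set_cons_zero]
  unfold lastRow
  rw [List.map_congr_left (l := List.range (n-1))
      (f := fun t : Nat => (((n-1) * n + 1 : Nat) : Int) + (t : Int))
      (g := fun j : Nat => (((n-1) * n + j : Nat) : Int) + 1)
      (fun t _ => by push_cast; ring)]

lemma outerLem (n : Nat) (hn : 2 ≤ n) :
    ∀ (d ii : Nat) (pre : List (List Int)), ii + d = n → pre.length = ii →
    pvLoopI (n : Int) ((List.range' ii d).map (fun x : Nat => (x : Int)))
        (pre ++ List.replicate d (List.replicate n 0), ((ii * n + 1 : Nat) : Int))
      = pre ++ (List.range' ii d).map (specRow n) := by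
  intro d
  induction d with
  | zero => intro ii pre _ _; simp [pvLoopI]
  | succ d ih =>
    intro ii pre hii hpre
    rw [List.range'_succ, List.map_cons, List.map_cons]
    simp only [pvLoopI, List.replicate_succ]
    rw [show PySem.List.pyRange 0 (n : Int) 1 = (List.range' 0 n).map (fun x : Nat => (x : Int)) by
      rw [PySem.List.pyRange_zero_nat, List.range_eq_range']]
    by_cases hlast : ii + 1 = n
    · -- last row: d = 0, early return
      have hd0 : d = 0 := by omega
      subst hd0
      have hii' : ii = n - 1 := by omega
      subst hii'
      rw [show (List.replicate 0 (List.replicate n (0:Int))) = ([] : List (List Int)) from rfl]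
      rw [lastRowLem n hn pre hpre]
      simp [specRow, hlast]
    · -- a full row, then recurse
      have hfill := innerFill n ii n 0 (List.replicate n (0:Int)) pre
          (List.replicate d (List.replicate n 0)) ((ii * n + 1 : Nat) : Int) hpre (by simp) (by omega)
          (fun t ht => pvCastNe (ii * n + 1) t n (by
            have hle : (ii + 1) * n ≤ (n - 1) * n := Nat.mul_le_mul_right n (by omega)
            have hMn : (n-1) * n = n * n - n := by rw [Nat.sub_one_mul]
            have hnM : n ≤ n * n := Nat.le_mul_of_pos_left n (by omega)
            have hsm : (ii + 1) * n = ii * n + n := by ring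
            omega))
      rw [hfill]
      have hrow : List.take 0 (List.replicate n (0:Int)) ++
          (List.range n).map (fun t : Nat => ((ii * n + 1 : Nat) : Int) + (t : Int)) ++
          (List.replicate n (0:Int)).drop (0 + n) = rowFull n ii := by
        simp [rowFull]
        intro a _; ring
      rw [hrow]
      have hnum : ((ii * n + 1 : Nat) : Int) + (n : Int) = (((ii+1) * n + 1 : Nat) : Int) := by
        exact_mod_cast (show ((ii * n + 1 : Nat) + n) = ((ii+1) * n + 1) by ring)
      rw [hnum]
      have := ih (ii+1) (pre ++ [rowFull n ii]) (by omega) (by simp [hpre])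
      rw [show pre ++ rowFull n ii :: List.replicate d (List.replicate n (0:Int))
            = (pre ++ [rowFull n ii]) ++ List.replicate d (List.replicate n 0) by simp]
      dsimp only
      rw [this]
      simp [specRow, hlast]

lemma A_eq (n : Nat) (hn : 2 ≤ n) :
    GENERAR_MATRIZ_META (n : Int) = (List.range' 0 n).map (specRow n) := by
  unfold GENERAR_MATRIZ_META
  rw [if_neg (by omega)]
  rw [show PySem.List.pyRange 0 (n : Int) 1 = (List.range' 0 n).map (fun x : Nat => (x : Int)) by
    rw [PySem.List.pyRange_zero_nat, List.range_eq_range']]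
  rw [List.map_const', List.length_map, List.length_range']
  rw [show ((n : Int).toNat) = n by simp]
  have h1 : (1 : Int) = ((0 * n + 1 : Nat) : Int) := by push_cast; ring
  rw [h1]
  simpa using outerLem n hn n 0 [] (by omega) rfl

-- the k-th chunk of the flat list is the k-th spec row
lemma chunk_eq (n ii : Nat) (hn : 2 ≤ n) (hii : ii < n) :
    List.take n (List.drop (ii * n)
        ((List.range (n*n-1)).map (fun k : Nat => (1 : Int) + (k : Int)) ++ [0]))
      = specRow n ii := by
  have hMn : (n-1) * n = n * n - n := by rw [Nat.sub_one_mul]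
  have hnM : n ≤ n * n := Nat.le_mul_of_pos_left n (by omega)
  have hle : ii * n ≤ (n - 1) * n := Nat.mul_le_mul_right n (by omega)
  have hsm : (ii + 1) * n = ii * n + n := by ring
  unfold specRow
  by_cases hl : ii + 1 = n
  · rw [if_pos hl]
    have hiv : ii = n - 1 := by omega
    subst hiv
    unfold lastRow
    apply List.ext_getElem
    · simp
      omega
    · intro t h1 h2
      have ht : t < n := by
        have := h2; simp at this; omega
      rw [List.getElem_take, List.getElem_drop]
      by_cases htl : t < n - 1
      · have hmid : (n - 1) * n + t < n * n - 1 := by omega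
        rw [List.getElem_append_left (by simpa using hmid),
            List.getElem_append_left (by simpa using htl)]
        rw [List.getElem_map, List.getElem_map, List.getElem_range, List.getElem_range]
        push_cast
        ring
      · have ht1 : t = n - 1 := by omega
        rw [List.getElem_append_right (by simp; omega),
            List.getElem_append_right (by simp; omega)]
        simp
  · rw [if_neg hl]
    have hle2 : (ii + 1) * n ≤ (n - 1) * n := Nat.mul_le_mul_right n (by omega)
    unfold rowFull
    apply List.ext_getElem
    · simp
      omega
    · intro t h1 h2
      have ht : t < n := by simpa using h2
      have hmid : ii * n + t < n * n - 1 := by omega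
      rw [List.getElem_take, List.getElem_drop]
      rw [List.getElem_append_left (by simpa using hmid)]
      rw [List.getElem_map, List.getElem_map, List.getElem_range, List.getElem_range]
      push_cast
      ring

lemma B_eq (n : Nat) (hn : 2 ≤ n) :
    GENERAR_MATRIZ_META_alt (n : Int) = (List.range' 0 n).map (specRow n) := by
  unfold GENERAR_MATRIZ_META_alt
  rw [if_neg (by omega)]
  have hflat : PySem.List.pyRange 1 ((n : Int) * n) 1
      = (List.range (n*n-1)).map (fun k : Nat => (1 : Int) + (k : Int)) := by
    rw [PySem.List.pyRange_one]
    congr 1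
    have : (n : Int) * n - 1 = ((n * n - 1 : Nat) : Int) := by push_cast [Nat.cast_sub (by nlinarith : 1 ≤ n*n)]; ring
    rw [this, Int.toNat_natCast]
  simp only [hflat]
  rw [show PySem.List.pyRange 0 (n : Int) 1 = (List.range' 0 n).map (fun x : Nat => (x : Int)) by
    rw [PySem.List.pyRange_zero_nat, List.range_eq_range']]
  rw [List.map_map]
  apply List.map_congr_left
  intro ii hmem
  have hii : ii < n := by
    have := List.mem_range'_1.mp hmem; omega
  have hsm : (ii + 1) * n = ii * n + n := by ring
  have e1 : (ii : Int) * n = ((ii * n : Nat) : Int) := by push_cast; ring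
  have e2 : ((ii : Int) + 1) * n = (((ii+1) * n : Nat) : Int) := by push_cast; ring
  simp only [Function.comp_apply, e1, e2, PySem.List.slice_natCast]
  rw [show (ii+1) * n - ii * n = n by omega]
  exact chunk_eq n ii hn hii

-- ===== VERDICT (by name: the statement is the Claim_ definition above) =====
theorem GENERAR_MATRIZ_META_spec : Claim_equal_GENERAR_MATRIZ_META := by
  intro N _ hPre
  unfold Spec_GENERAR_MATRIZ_META
  have hPre' : 2 ≤ N := hPre
  have hN : N = ((N.toNat : Nat) : Int) := by omega
  have hn : 2 ≤ N.toNat := by omega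
  rw [hN, A_eq _ hn, B_eq _ hn]
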